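-- pv_equiv track=rewrite | github.com/denisefavila/training | interview/interview/and_or_function.py | get_or
-- ===== SOURCE A (Python) =====
-- def get_or(intervals1, intervals2):
--     """
--     intervals1 = [(2, 4), (6, 8), (1, 3)] -> [(1, 3), (2, 4), (6, 8)]
--     intervals2 = [(7, 9), (2, 5)] -> [(2, 5), (7, 9)]
--     expected_union = [(1, 5), (6, 9)]
--
--     # merge intervals
--
--     """
--
--     def add_interval(start, end):
--         if not result or start > result[-1][1]:
--             result.append((start, end))
--         else:
--             # merge
--             last_start, last_end = result[-1]
--             result[-1] = (last_start, max(last_end, end))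
--
--     intervals1.sort()
--     intervals2.sort()
--
--     result = []
--
--     i, j = 0, 0
--     while i < len(intervals1) and j < len(intervals2):
--         start_1, end_1 = intervals1[i]
--         start_2, end_2 = intervals2[j]
--         if start_1 < start_2:
--             add_interval(start_1, end_1)
--             i += 1
--
--         else:
--             add_interval(start_2, end_2)
--             j += 1
--
--     while i < len(intervals1):
--         current_start, current_end = intervals1[i]
--         add_interval(current_start, current_end)
--         i += 1
--
--     while j < len(intervals2):
--         current_start, current_end = intervals2[j]
--         add_interval(current_start, current_end)
--         j += 1
--
--     return result
-- ===== SOURCE B (Python) =====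
-- def get_or(intervals1, intervals2):
--     # Sort both inputs in place (as the original does), then do one stable
--     # start-key sort of the combined list and a single linear sweep.
--     # intervals2 goes first so that, on equal starts, the stable sort keeps
--     # the same processing order as the original two-pointer merge.
--     intervals1.sort()
--     intervals2.sort()
--     combined = sorted(intervals2 + intervals1, key=lambda t: t[0])
--     result = []
--     for start, end in combined:
--         if result and start <= result[-1][1]:
--             last_start, last_end = result[-1]
--             result[-1] = (last_start, max(last_end, end))
--         else:
--             result.append((start, end))
--     return result
-- ===== Notes on version B (the rewrite author's own statement) =====
-- stated objective: alternative
-- what changed: Replaces the two-pointer interleaving merge of the two pre-sorted lists with one stable start-key sort of the combined list followed by a single linear sweep; both inputs are still sorted in place.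
import Mathlib
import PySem

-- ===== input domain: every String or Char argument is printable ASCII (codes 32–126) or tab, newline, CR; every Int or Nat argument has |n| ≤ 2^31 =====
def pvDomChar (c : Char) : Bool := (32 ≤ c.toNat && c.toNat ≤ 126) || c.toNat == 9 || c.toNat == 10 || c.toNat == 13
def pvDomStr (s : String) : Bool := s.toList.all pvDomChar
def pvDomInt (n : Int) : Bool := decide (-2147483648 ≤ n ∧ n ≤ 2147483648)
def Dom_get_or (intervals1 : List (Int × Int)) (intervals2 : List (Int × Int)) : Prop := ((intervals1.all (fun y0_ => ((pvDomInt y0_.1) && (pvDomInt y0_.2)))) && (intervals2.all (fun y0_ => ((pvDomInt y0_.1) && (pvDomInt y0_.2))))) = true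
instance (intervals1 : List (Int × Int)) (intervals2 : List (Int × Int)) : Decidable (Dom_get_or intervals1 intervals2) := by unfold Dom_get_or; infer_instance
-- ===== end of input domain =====

-- B (objective: alternative): replaces A's two-pointer merge of the two pre-sorted
-- lists with one stable start-key sort of the combined list plus a single linear
-- sweep; A sorts both arguments in place and B does the same (the equivalence
-- proved here is about the return value).
-- ===== PORT A =====
-- A keeps `result` in Python append-order; both ports keep it REVERSED (head =
-- Python's result[-1]) and reverse once on return — same values, O(1) last access.
-- add_interval(start, end) acting on the reversed result:
def pvAdd (result : List (Int × Int)) (x : Int × Int) : List (Int × Int) :=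
  match result with
  | [] => [x]
  | (last_start, last_end) :: t =>
      if x.1 > last_end then x :: (last_start, last_end) :: t
      else (last_start, max last_end x.2) :: t

-- the two-pointer while loop plus the two drain loops (indices i, j become
-- structural recursion consuming the heads of the two sorted lists):
def pvLoop : List (Int × Int) → List (Int × Int) → List (Int × Int) → List (Int × Int)
  | (s1, e1) :: xs, (s2, e2) :: ys, result =>
      if s1 < s2 then pvLoop xs ((s2, e2) :: ys) (pvAdd result (s1, e1))
      else pvLoop ((s1, e1) :: xs) ys (pvAdd result (s2, e2))
  | xs, ys, result => ys.foldl pvAdd (xs.foldl pvAdd result)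
  termination_by xs ys _ => xs.length + ys.length

def get_or (intervals1 : List (Int × Int)) (intervals2 : List (Int × Int)) : List (Int × Int) :=
  (pvLoop (PySem.List.sorted2 intervals1 Prod.fst Prod.snd)
          (PySem.List.sorted2 intervals2 Prod.fst Prod.snd) []).reverse

-- ===== PORT B =====
-- B's loop body (result reversed, see above); B tests the merge branch first:
def pvAddB (result : List (Int × Int)) (x : Int × Int) : List (Int × Int) :=
  match result with
  | [] => [x]
  | (last_start, last_end) :: t =>
      if x.1 ≤ last_end then (last_start, max last_end x.2) :: t
      else x :: (last_start, last_end) :: t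

def get_or_alt (intervals1 : List (Int × Int)) (intervals2 : List (Int × Int)) : List (Int × Int) :=
  ((PySem.List.sorted
      (PySem.List.sorted2 intervals2 Prod.fst Prod.snd ++
        PySem.List.sorted2 intervals1 Prod.fst Prod.snd) Prod.fst).foldl pvAddB []).reverse

-- ===== PRECONDITION & SPEC =====
def Spec_get_or (intervals1 : List (Int × Int)) (intervals2 : List (Int × Int)) (out : List (Int × Int)) : Prop := out = get_or_alt intervals1 intervals2
instance (intervals1 : List (Int × Int)) (intervals2 : List (Int × Int)) (out : List (Int × Int)) : Decidable (Spec_get_or intervals1 intervals2 out) := by unfold Spec_get_or; infer_instance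

-- ===== CLAIM (what is proved, stated in full; the proofs are below) =====
def Claim_equal_get_or : Prop := ∀ (intervals1 : List (Int × Int)) (intervals2 : List (Int × Int)), Dom_get_or intervals1 intervals2 → Spec_get_or intervals1 intervals2 (get_or intervals1 intervals2)

-- ===== LEMMAS AND PROOFS =====

-- B's loop body computes the same step as A's add_interval (branches mirrored).
theorem pvAddB_eq_pvAdd : pvAddB = pvAdd := by
  funext r x
  match r with
  | [] => rfl
  | (ls, le) :: t =>
    simp only [pvAddB, pvAdd]
    rcases lt_or_ge le x.1 with h | h
    · rw [if_neg (by omega), if_pos (by omega)]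
    · rw [if_pos (by omega), if_neg (by omega)]

-- the order in which A's two-pointer merge feeds intervals to add_interval:
def mseq : List (Int × Int) → List (Int × Int) → List (Int × Int)
  | x :: xs, y :: ys => if x.1 < y.1 then x :: mseq xs (y :: ys) else y :: mseq (x :: xs) ys
  | xs, ys => xs ++ ys
  termination_by xs ys => xs.length + ys.length

theorem mseq_nil_left (ys : List (Int × Int)) : mseq [] ys = ys := by
  cases ys <;> simp [mseq]

theorem pvLoop_eq_foldl (xs ys r : List (Int × Int)) :
    pvLoop xs ys r = (mseq xs ys).foldl pvAdd r := by
  induction xs, ys, r using pvLoop.induct with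
  | case1 s1 e1 xs s2 e2 ys r h ih => rw [pvLoop, mseq, if_pos h, if_pos h]; exact ih
  | case2 s1 e1 xs s2 e2 ys r h ih => rw [pvLoop, mseq, if_neg h, if_neg h]; exact ih
  | case3 xs ys r h =>
    match xs, ys with
    | [], ys => simp [pvLoop, mseq_nil_left]
    | x :: xs, [] => simp [pvLoop, mseq]
    | x :: xs, y :: ys => exact (h x.1 x.2 xs y.1 y.2 ys (by simp) (by simp)).elim

-- stable insertion of x by the start key: after the prefix with start ≤ x.1
theorem insertBy_fst_eq (x : Int × Int) (ys : List (Int × Int)) :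
    PySem.List.insertBy (fun a b => decide (a.1 < b.1)) x ys =
      ys.takeWhile (fun y => !decide (x.1 < y.1)) ++
        x :: ys.dropWhile (fun y => !decide (x.1 < y.1)) := by
  induction ys with
  | nil => rfl
  | cons y ys ih =>
    by_cases h : x.1 < y.1
    · simp [PySem.List.insertBy, List.takeWhile, List.dropWhile, h]
    · simp [PySem.List.insertBy, List.takeWhile, List.dropWhile, h, ih]

theorem mseq_cons_eq (x : Int × Int) (xs ys : List (Int × Int)) :
    mseq (x :: xs) ys =
      ys.takeWhile (fun y => !decide (x.1 < y.1)) ++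
        x :: mseq xs (ys.dropWhile (fun y => !decide (x.1 < y.1))) := by
  induction ys with
  | nil => simp [mseq]
  | cons y ys ih =>
    by_cases h : x.1 < y.1
    · simp [mseq, List.takeWhile, List.dropWhile, h]
    · simp only [mseq, List.takeWhile, List.dropWhile, h]
      simp [ih]

theorem mseq_middle (xs pre : List (Int × Int)) (x : Int × Int) (rest : List (Int × Int))
    (h1 : ∀ z ∈ xs, x.1 ≤ z.1) (h2 : ∀ w ∈ pre, w.1 ≤ x.1) :
    mseq xs (pre ++ x :: rest) = pre ++ x :: mseq xs rest := by
  induction pre with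
  | nil =>
    match xs with
    | [] => simp [mseq_nil_left]
    | z :: xs =>
      have hz : x.1 ≤ z.1 := h1 z (by simp)
      simp only [List.nil_append, mseq, if_neg (by omega : ¬ z.1 < x.1)]
  | cons w pre ih =>
    have hw : w.1 ≤ x.1 := h2 w (by simp)
    match xs with
    | [] => simp [mseq_nil_left]
    | z :: xs =>
      have hz : x.1 ≤ z.1 := h1 z (by simp)
      simp only [List.cons_append, mseq, if_neg (by omega : ¬ z.1 < w.1)]
      rw [ih (fun w hwm => h2 w (by simp [hwm]))]

-- folding stable insertion of a start-sorted xs into ys IS the two-pointer merge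
theorem foldl_insertBy_eq_mseq (xs : List (Int × Int))
    (hxs : xs.Pairwise (fun a b => a.1 ≤ b.1)) (ys : List (Int × Int)) :
    xs.foldl (fun acc x => PySem.List.insertBy (fun a b => decide (a.1 < b.1)) x acc) ys =
      mseq xs ys := by
  induction xs generalizing ys with
  | nil => simp [mseq_nil_left]
  | cons x xs ih =>
    rcases List.pairwise_cons.mp hxs with ⟨hx, htl⟩
    rw [List.foldl_cons, ih htl, insertBy_fst_eq, mseq_middle, ← mseq_cons_eq]
    · exact hx
    · intro w hw
      have := List.takeWhile_subset (l := ys) (p := fun y => !decide (x.1 < y.1)) hw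
      have hp := List.mem_takeWhile_imp hw
      simp at hp; omega

-- any foldl-insertBy sort produces a list pairwise in a relation both branch
-- directions of `before` imply
theorem insertBy_pairwise {α : Type} {R : α → α → Prop} (before : α → α → Bool)
    (hT : ∀ a b c : α, R a b → R b c → R a c) (hb : ∀ a b, (before a b = true → R a b) ∧ (before a b = false → R b a))
    (x : α) (ys : List α) (hys : ys.Pairwise R) :
    (PySem.List.insertBy before x ys).Pairwise R := by
  induction ys with
  | nil => simp [PySem.List.insertBy]
  | cons y ys ih =>
    rcases List.pairwise_cons.mp hys with ⟨hy, htl⟩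
    by_cases h : before x y = true
    · simp only [PySem.List.insertBy, if_pos h]
      refine List.pairwise_cons.mpr ⟨?_, hys⟩
      intro z hz
      rcases List.mem_cons.mp hz with rfl | hz
      · exact (hb x z).1 h
      · exact hT x y z ((hb x y).1 h) (hy z hz)
    · simp only [PySem.List.insertBy, if_neg h]
      refine List.pairwise_cons.mpr ⟨?_, ih htl⟩
      intro z hz
      have hz' : z = x ∨ z ∈ ys := by simpa [PySem.List.mem_insertBy] using hz
      rcases hz' with rfl | hz'
      · exact (hb z y).2 (by simpa using h)
      · exact hy z hz' 

theorem foldl_insertBy_pairwise {α : Type} {R : α → α → Prop} (before : α → α → Bool)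
    (hT : ∀ a b c : α, R a b → R b c → R a c) (hb : ∀ a b, (before a b = true → R a b) ∧ (before a b = false → R b a))
    (xs acc : List α) (hacc : acc.Pairwise R) :
    (xs.foldl (fun acc x => PySem.List.insertBy before x acc) acc).Pairwise R := by
  induction xs generalizing acc with
  | nil => exact hacc
  | cons x xs ih => exact ih _ (insertBy_pairwise before hT hb x acc hacc)

-- the lexicographically sorted lists are in particular start-sorted
theorem sorted2_pairwise_fst (xs : List (Int × Int)) :
    (PySem.List.sorted2 xs Prod.fst Prod.snd).Pairwise (fun a b => a.1 ≤ b.1) := by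
  refine foldl_insertBy_pairwise (R := fun a b : Int × Int => a.1 ≤ b.1) _ (fun _ _ _ hab hbc => le_trans hab hbc) ?_ xs [] (by simp)
  intro a b
  constructor <;> intro h <;> simp at h <;> omega

theorem sorted_append_sorted_eq_mseq (xs ys : List (Int × Int))
    (hxs : xs.Pairwise (fun a b => a.1 ≤ b.1)) (hys : ys.Pairwise (fun a b => a.1 ≤ b.1)) :
    PySem.List.sorted (ys ++ xs) Prod.fst = mseq xs ys := by
  rw [PySem.List.sorted_eq_foldl_insertBy, List.foldl_append]
  rw [← PySem.List.sorted_eq_foldl_insertBy, PySem.List.sorted_eq_self_of_pairwise ys Prod.fst hys]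
  exact foldl_insertBy_eq_mseq xs hxs ys

-- ===== VERDICT (by name: the statement is the Claim_ definition above) =====
theorem get_or_spec : Claim_equal_get_or := by
  intro intervals1 intervals2 _
  unfold Spec_get_or get_or get_or_alt
  rw [sorted_append_sorted_eq_mseq _ _ (sorted2_pairwise_fst _) (sorted2_pairwise_fst _)]
  rw [pvAddB_eq_pvAdd, pvLoop_eq_foldl]
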